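-- pv_equiv track=rewrite | github.com/AuScope/geomodel-2-3dweb | scripts/lib/imports/gocad/helpers.py | make_line_gen
-- ===== SOURCE A (Python) =====
-- def _parse_quoted_labels(line_str):
--     ''' Look out for double-quoted label strings and substitute underscores
--
--     :param line_str: line string
--     :reurns: all double-quoted labels with spaces now have double quotes removed and underscores
--              substituted for labels
--     '''
--     while line_str.count('"') >= 2:
--         before_tup = line_str.partition('"')
--         after_tup = before_tup[2].partition('"')
--         line_str = before_tup[0] + " " + after_tup[0].strip(' ').replace(' ', '_') \
--                    + " " + after_tup[2]
--     return line_str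
--
-- def _parse_quoted_filename(line):
--     ''' Split up the string, correctly parsing a quoted filename
--
--     :param line: a line of input file
--     :returns: array of tokens, split up version of line, token separator is a space
--     '''
--     if line.count('"') < 2:
--         return line.split()
--     if line.count('"') >= 2:
--         before_tup = line.partition('"')
--         after_tup = before_tup[2].partition('"')
--     return before_tup[0].split() + [after_tup[0]] + after_tup[2].split()
--
-- def make_line_gen(file_lines):
--     ''' This is a Python generator function that processes lines of the GOCAD object file
--         and returns each line in various forms, from quite unprocessed to fully processed
--
--     :param filename_str: filename of gocad file
--     :param file_lines: array of strings of lines from gocad file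
--     :returns: array of field strings in upper case with double quotes removed from strings,
--              array of field string in original case without double quotes removed,
--              line of GOCAD file in upper case,
--              boolean, True iff it is the last line of the file
--     '''
--     for line in file_lines:
--         line_str = line.rstrip(' \n\r').upper()
--
--         # Split up the string, substituting underscores for spaces in doubled quoted labels
--         line_str = _parse_quoted_labels(line_str)
--         splitstr_arr = line_str.split()
--
--         # Split up the string, correctly parsing quoted filename
--         splitstr_arr_raw = _parse_quoted_filename(line.rstrip(' \n\r'))
--
--         # Skip blank lines
--         if not splitstr_arr:
--             continue
--         yield splitstr_arr, splitstr_arr_raw, line_str, line == file_lines[-1:][0]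
--     yield [], [], '', True
-- ===== SOURCE B (Python) =====
-- def _parse_quoted_labels(line_str):
--     ''' Single left-to-right scan: copy chars outside quotes; buffer chars inside
--         quotes and, when a pair closes, emit space + cleaned label + space. '''
--     out = []
--     buf = []
--     inside = False
--     for ch in line_str:
--         if ch == '"':
--             if inside:
--                 label = ''.join(buf).strip(' ')
--                 out.append(' ')
--                 out.extend('_' if c == ' ' else c for c in label)
--                 out.append(' ')
--                 buf = []
--             inside = not inside
--         elif inside:
--             buf.append(ch)
--         else:
--             out.append(ch)
--     if inside:
--         out.append('"')
--         out.extend(buf)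
--     return ''.join(out)
--
-- def _parse_quoted_filename(line):
--     ''' Locate the first two quote positions directly, then slice. '''
--     quote_pos = [k for k, ch in enumerate(line) if ch == '"']
--     if len(quote_pos) >= 2:
--         i, j = quote_pos[0], quote_pos[1]
--         return line[:i].split() + [line[i + 1:j]] + line[j + 1:].split()
--     return line.split()
--
-- def make_line_gen(file_lines):
--     last = file_lines[-1] if file_lines else None
--     for line in file_lines:
--         base = line.rstrip(' \n\r')
--         line_str = _parse_quoted_labels(base.upper())
--         tokens = line_str.split()
--         if tokens:
--             yield tokens, _parse_quoted_filename(base), line_str, line == last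
--     yield [], [], '', True
-- ===== Notes on version B (the rewrite author's own statement) =====
-- stated objective: alternative
-- what changed: The quadratic while/partition rebuild loop of _parse_quoted_labels becomes a single left-to-right scan with an inside-quote flag and a buffer, _parse_quoted_filename locates the first two quote positions with one enumerate pass and slices instead of double partition, and the last-line flag is computed once up front.
import Mathlib
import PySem

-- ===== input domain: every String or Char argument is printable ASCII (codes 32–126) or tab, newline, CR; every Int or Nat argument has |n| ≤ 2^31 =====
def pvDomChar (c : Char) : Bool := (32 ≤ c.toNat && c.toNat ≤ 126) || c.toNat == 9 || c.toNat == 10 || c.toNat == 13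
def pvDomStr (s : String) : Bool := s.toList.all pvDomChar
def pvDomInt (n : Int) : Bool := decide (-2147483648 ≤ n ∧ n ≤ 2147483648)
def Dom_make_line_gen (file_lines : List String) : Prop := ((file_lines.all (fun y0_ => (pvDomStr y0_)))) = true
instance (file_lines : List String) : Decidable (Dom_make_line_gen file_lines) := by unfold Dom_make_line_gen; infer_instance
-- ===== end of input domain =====

-- B rewrites the quadratic while/partition label rebuild as one linear scan with an inside-quote
-- flag, and finds the two quote positions for the quoted filename with one enumerate pass
-- instead of a double partition (objective: alternative decomposition, same results).

-- ===== PORT A =====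
-- hand port of line.rstrip(' \n\r') (rstrip with an explicit char set; exact: drops exactly
-- the trailing characters among ' ', '\n', '\r'); both Pythons call this same builtin.
def rstripSNR (s : List Char) : List Char :=
  (s.reverse.dropWhile (fun c => c == ' ' || c == '\n' || c == '\r')).reverse

-- hand port of str.partition('"') as (before, found?, after); Python's middle component is
-- '"' iff found else '' , so a Bool is exact here.
def partQ : List Char → List Char × Bool × List Char
  | [] => ([], false, [])
  | c :: t =>
    if c == '"' then ([], true, t)
    else
      let r := partQ t
      (c :: r.1, r.2.1, r.2.2)

-- after_tup[0].strip(' ').replace(' ', '_')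
def labelFixA (c : List Char) : List Char :=
  PySem.Chars.replace (PySem.Chars.stripChars c [' ']) [' '] ['_']

-- the while loop of _parse_quoted_labels; fuel s.length is enough since every iteration
-- removes two '"' characters and adds none (proved below in pql_main / count lemmas).
def pqlAloop : Nat → List Char → List Char
  | 0, s => s
  | n + 1, s =>
    if 2 ≤ PySem.Chars.count s ['"'] then
      let bt := partQ s
      let at_ := partQ bt.2.2
      pqlAloop n (bt.1 ++ ' ' :: (labelFixA at_.1 ++ ' ' :: at_.2.2))
    else s

def parseQuotedLabelsA (s : List Char) : List Char := pqlAloop s.length s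

def parseQuotedFilenameA (s : List Char) : List (List Char) :=
  if PySem.Chars.count s ['"'] < 2 then PySem.Chars.split₀ s
  else
    let bt := partQ s
    let at_ := partQ bt.2.2
    PySem.Chars.split₀ bt.1 ++ [at_.1] ++ PySem.Chars.split₀ at_.2.2

-- line == file_lines[-1:][0]; the [0] indexing is ported as pyGet? ... 0 compared under
-- some, exact wherever the loop body runs (file_lines is nonempty there).
def make_line_gen (file_lines : List String) : List (List String × List String × String × Bool) :=
  (file_lines.foldl (fun acc line =>
      let line_str := parseQuotedLabelsA (PySem.Chars.upper (rstripSNR line.toList))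
      let splitstr_arr := PySem.Chars.split₀ line_str
      let raw := parseQuotedFilenameA (rstripSNR line.toList)
      if splitstr_arr.isEmpty then acc
      else acc ++ [(splitstr_arr.map String.ofList, raw.map String.ofList, String.ofList line_str,
                    some line == PySem.List.pyGet? (PySem.List.slice file_lines (some (-1)) none) 0)])
    []) ++ [([], [], "", true)]

-- ===== PORT B =====
-- ''.join(buf).strip(' ') with ' '→'_' done char-by-char
def labelFixB (buf : List Char) : List Char :=
  (PySem.Chars.stripChars buf [' ']).map (fun c => if c == ' ' then '_' else c)

-- one step of Source B's scan; state = (out, inside, buf)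
def scanStep (st : List Char × Bool × List Char) (ch : Char) : List Char × Bool × List Char :=
  if ch == '"' then
    if st.2.1 then (st.1 ++ ' ' :: (labelFixB st.2.2 ++ [' ']), false, [])
    else (st.1, true, st.2.2)
  else if st.2.1 then (st.1, st.2.1, st.2.2 ++ [ch])
  else (st.1 ++ [ch], st.2.1, st.2.2)

-- the trailing 'if inside: out.append('"'); out.extend(buf)'
def finishScan (st : List Char × Bool × List Char) : List Char :=
  if st.2.1 then st.1 ++ '"' :: st.2.2 else st.1

def parseQuotedLabelsB (s : List Char) : List Char :=
  finishScan (s.foldl scanStep ([], false, []))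

def parseQuotedFilenameB (s : List Char) : List (List Char) :=
  let quote_pos := ((PySem.List.enumerate s).filter (fun p => p.2 == '"')).map (·.1)
  match quote_pos with
  | i :: j :: _ =>
      PySem.Chars.split₀ (PySem.List.slice s none (some i)) ++
      [PySem.List.slice s (some (i + 1)) (some j)] ++
      PySem.Chars.split₀ (PySem.List.slice s (some (j + 1)) none)
  | _ => PySem.Chars.split₀ s

def make_line_gen_alt (file_lines : List String) : List (List String × List String × String × Bool) :=
  let last := file_lines.getLast?
  (file_lines.filterMap (fun line =>
      let base := rstripSNR line.toList
      let line_str := parseQuotedLabelsB (PySem.Chars.upper base)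
      let tokens := PySem.Chars.split₀ line_str
      if tokens.isEmpty then none
      else some (tokens.map String.ofList, (parseQuotedFilenameB base).map String.ofList,
                 String.ofList line_str, some line == last)))
  ++ [([], [], "", true)]

-- ===== PRECONDITION & SPEC =====
def Spec_make_line_gen (file_lines : List String) (out : List (List String × List String × String × Bool)) : Prop := out = make_line_gen_alt file_lines
instance (file_lines : List String) (out : List (List String × List String × String × Bool)) : Decidable (Spec_make_line_gen file_lines out) := by unfold Spec_make_line_gen; infer_instance

-- ===== CLAIM (what is proved, stated in full; the proofs are below) =====
def Claim_equal_make_line_gen : Prop := ∀ (file_lines : List String), Dom_make_line_gen file_lines → Spec_make_line_gen file_lines (make_line_gen file_lines)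

-- ===== LEMMAS AND PROOFS =====

theorem countgo_single (s : List Char) : ∀ (fuel acc : Nat), s.length ≤ fuel →
    PySem.Chars.count.go ['"'] fuel s acc = acc + s.count '"' := by
  induction s with
  | nil => intro fuel acc _; cases fuel <;> simp [PySem.Chars.count.go]
  | cons c t ih =>
    intro fuel acc h
    cases fuel with
    | zero => simp at h
    | succ f =>
      simp only [PySem.Chars.count.go]
      by_cases hc : c = '"'
      · subst hc
        simp [List.isPrefixOf, ih f (acc + 1) (by simpa using h)]
        omega
      · have hpre : (['"'].isPrefixOf (c :: t)) = false := by
          simp [List.isPrefixOf]; exact fun h' => absurd h'.symm hc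
        simp [hpre, ih f acc (by simpa using h), hc]

theorem count_quote_eq (s : List Char) : PySem.Chars.count s ['"'] = s.count '"' := by
  simp [PySem.Chars.count, countgo_single s s.length 0 le_rfl]

theorem replacego_single (s : List Char) : ∀ (fuel : Nat) (acc : List Char), s.length ≤ fuel →
    PySem.Chars.replace.go [' '] ['_'] fuel s acc
      = acc.reverse ++ s.map (fun c => if c == ' ' then '_' else c) := by
  induction s with
  | nil => intro fuel acc _; cases fuel <;> simp [PySem.Chars.replace.go]
  | cons c t ih =>
    intro fuel acc h
    cases fuel with
    | zero => simp at h
    | succ f =>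
      simp only [PySem.Chars.replace.go]
      by_cases hc : c = ' '
      · subst hc
        simp [List.isPrefixOf, ih f ('_' :: acc) (by simpa using h)]
      · have hpre : ([' '].isPrefixOf (c :: t)) = false := by
          simp [List.isPrefixOf]; exact fun h' => absurd h'.symm hc
        simp [hpre, ih f (c :: acc) (by simpa using h), hc]

theorem labelFix_eq (c : List Char) : labelFixA c = labelFixB c := by
  unfold labelFixA labelFixB
  simp [PySem.Chars.replace,
    replacego_single (PySem.Chars.stripChars c [' ']) (PySem.Chars.stripChars c [' ']).length [] le_rfl]

theorem strip_mem {x : Char} {c : List Char} (h : x ∈ PySem.Chars.stripChars c [' ']) : x ∈ c := by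
  unfold PySem.Chars.stripChars at h
  simp only [List.mem_reverse] at h
  have h2 := (List.dropWhile_sublist _).mem h
  simp only [List.mem_reverse] at h2
  exact (List.dropWhile_sublist _).mem h2

theorem labelFixB_noq {c : List Char} (h : '"' ∉ c) : '"' ∉ labelFixB c := by
  intro hm
  unfold labelFixB at hm
  rcases List.mem_map.1 hm with ⟨x, hx, hfx⟩
  by_cases hsp : x = ' '
  · simp [hsp] at hfx
  · simp [hsp] at hfx
    exact h (strip_mem (hfx ▸ hx))

theorem partQ_decomp {s : List Char} (h : '"' ∈ s) :
    ∃ b r, partQ s = (b, true, r) ∧ s = b ++ '"' :: r ∧ '"' ∉ b := by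
  induction s with
  | nil => simp at h
  | cons c t ih =>
    by_cases hc : c = '"'
    · exact ⟨[], t, by simp [partQ, hc], by simp [hc], by simp⟩
    · have ht : '"' ∈ t := by
        rcases List.mem_cons.1 h with h1 | h1
        · exact absurd h1.symm hc
        · exact h1
      rcases ih ht with ⟨b, r, hpq, hdec, hnb⟩
      refine ⟨c :: b, r, ?_, by simp [hdec], ?_⟩
      · simp [partQ, hc, hpq]
      · intro hm
        rcases List.mem_cons.1 hm with h1 | h1
        · exact hc h1.symm
        · exact hnb h1

theorem scan_shift_aux {α : Type} (x y z : List α) : x ++ y ++ z = x ++ (y ++ z) := (List.append_assoc x y z)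

theorem scan_shift (cs : List Char) : ∀ (out : List Char) (i : Bool) (b : List Char),
    cs.foldl scanStep (out, i, b)
      = (out ++ (cs.foldl scanStep ([], i, b)).1, (cs.foldl scanStep ([], i, b)).2) := by
  induction cs with
  | nil => intro out i b; simp
  | cons c t ih =>
    intro out i b
    simp only [List.foldl_cons]
    by_cases hc : c = '"'
    · subst hc
      cases i
      · rw [show scanStep (out, false, b) '"' = (out ++ [], true, b) by simp [scanStep],
            show scanStep ([], false, b) '"' = ([], true, b) by simp [scanStep]]
        rw [ih (out ++ []) true b, ih [] true b]; simp
      · rw [show scanStep (out, true, b) '"' = (out ++ (' ' :: (labelFixB b ++ [' '])), false, []) by simp [scanStep],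
            show scanStep ([], true, b) '"' = (' ' :: (labelFixB b ++ [' ']), false, []) by simp [scanStep]]
        rw [ih (out ++ (' ' :: (labelFixB b ++ [' ']))) false [], ih (' ' :: (labelFixB b ++ [' '])) false []]
        rw [scan_shift_aux]
    · cases i
      · rw [show scanStep (out, false, b) c = (out ++ [c], false, b) by simp [scanStep, hc],
            show scanStep ([], false, b) c = ([c], false, b) by simp [scanStep, hc]]
        rw [ih (out ++ [c]) false b, ih [c] false b]
        rw [scan_shift_aux]
      · rw [show scanStep (out, true, b) c = (out, true, b ++ [c]) by simp [scanStep, hc],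
            show scanStep ([], true, b) c = ([], true, b ++ [c]) by simp [scanStep, hc]]
        exact ih out true (b ++ [c])

theorem scan_outside (p : List Char) : ∀ (out : List Char), '"' ∉ p →
    p.foldl scanStep (out, false, []) = (out ++ p, false, []) := by
  induction p with
  | nil => intro out _; simp
  | cons c t ih =>
    intro out h
    have hc : ¬ (c = '"') := fun he => h (he ▸ List.mem_cons_self ..)
    have ht : '"' ∉ t := fun hm => h (List.mem_cons_of_mem _ hm)
    simp only [List.foldl_cons,
      show scanStep (out, false, []) c = (out ++ [c], false, []) by simp [scanStep, hc]]
    rw [ih (out ++ [c]) ht]; simp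

theorem scan_inside (c : List Char) : ∀ (out buf : List Char), '"' ∉ c →
    c.foldl scanStep (out, true, buf) = (out, true, buf ++ c) := by
  induction c with
  | nil => intro out buf _; simp
  | cons x t ih =>
    intro out buf h
    have hx : ¬ (x = '"') := fun he => h (he ▸ List.mem_cons_self ..)
    have ht : '"' ∉ t := fun hm => h (List.mem_cons_of_mem _ hm)
    simp only [List.foldl_cons,
      show scanStep (out, true, buf) x = (out, true, buf ++ [x]) by simp [scanStep, hx]]
    rw [ih out (buf ++ [x]) ht]; simp

theorem pqlB_noq {s : List Char} (h : '"' ∉ s) : parseQuotedLabelsB s = s := by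
  unfold parseQuotedLabelsB
  rw [scan_outside s [] h]
  simp [finishScan]

theorem pqlB_oneq {p r : List Char} (hp : '"' ∉ p) (hr : '"' ∉ r) :
    parseQuotedLabelsB (p ++ '"' :: r) = p ++ '"' :: r := by
  unfold parseQuotedLabelsB
  rw [List.foldl_append, scan_outside p [] hp]
  simp only [List.foldl_cons,
    show scanStep (([] : List Char) ++ p, false, []) '"' = ([] ++ p, true, []) by simp [scanStep]]
  rw [scan_inside r ([] ++ p) [] hr]
  simp [finishScan]

theorem pqlB_prefix {p : List Char} (t : List Char) (hp : '"' ∉ p) :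
    parseQuotedLabelsB (p ++ t) = p ++ parseQuotedLabelsB t := by
  unfold parseQuotedLabelsB
  rw [List.foldl_append, scan_outside p [] hp]
  have : (([] : List Char) ++ p, false, ([] : List Char)) = (p, false, ([] : List Char)) := by simp
  rw [this, show (p, false, ([] : List Char)) = ((p : List Char), false, ([] : List Char)) from rfl]
  rw [show t.foldl scanStep (p, false, []) = (p ++ (t.foldl scanStep ([], false, [])).1, (t.foldl scanStep ([], false, [])).2) from scan_shift t p false []]
  unfold finishScan
  rcases hst : t.foldl scanStep ([], false, []) with ⟨o, i, b⟩
  cases i <;> simp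

theorem pqlB_pair {c : List Char} (t : List Char) (hc : '"' ∉ c) :
    parseQuotedLabelsB ('"' :: (c ++ '"' :: t))
      = ' ' :: (labelFixB c ++ ' ' :: parseQuotedLabelsB t) := by
  unfold parseQuotedLabelsB
  simp only [List.foldl_cons,
    show scanStep (([] : List Char), false, []) '"' = ([], true, []) by simp [scanStep]]
  rw [List.foldl_append, scan_inside c [] [] hc]
  simp only [List.nil_append, List.foldl_cons,
    show scanStep (([] : List Char), true, c) '"' = (' ' :: (labelFixB c ++ [' ']), false, []) by simp [scanStep]]
  rw [show t.foldl scanStep (' ' :: (labelFixB c ++ [' ']), false, []) = ((' ' :: (labelFixB c ++ [' '])) ++ (t.foldl scanStep ([], false, [])).1, (t.foldl scanStep ([], false, [])).2) from scan_shift t _ false []]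
  unfold finishScan
  rcases hst : t.foldl scanStep ([], false, []) with ⟨o, i, b⟩
  cases i <;> simp

theorem pql_main : ∀ (n : Nat) (s : List Char), s.count '"' ≤ n →
    pqlAloop n s = parseQuotedLabelsB s := by
  intro n
  induction n with
  | zero =>
    intro s h
    have h0 : s.count '"' = 0 := Nat.le_zero.1 h
    have hnm : '"' ∉ s := by
      intro hm; have := List.count_pos_iff.2 hm; omega
    simpa [pqlAloop] using (pqlB_noq hnm).symm
  | succ n ih =>
    intro s h
    simp only [pqlAloop, count_quote_eq]
    by_cases h2 : 2 ≤ s.count '"'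
    · simp only [h2, if_true]
      have hm : '"' ∈ s := List.count_pos_iff.1 (by omega)
      rcases partQ_decomp hm with ⟨b, r, hpq, hdec, hnb⟩
      have hcr : r.count '"' = s.count '"' - 1 := by
        subst hdec; simp [List.count_append, List.count_eq_zero_of_not_mem hnb]
      have hmr : '"' ∈ r := List.count_pos_iff.1 (by omega)
      rcases partQ_decomp hmr with ⟨c, a, hpq2, hdec2, hnc⟩
      have hca : a.count '"' = r.count '"' - 1 := by
        subst hdec2; simp [List.count_append, List.count_eq_zero_of_not_mem hnc]
      rw [hpq, hpq2]
      simp only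
      have hnoqf : '"' ∉ labelFixA c := by
        rw [labelFix_eq]; exact labelFixB_noq hnc
      have hcnt : (b ++ ' ' :: (labelFixA c ++ ' ' :: a)).count '"' = a.count '"' := by
        simp [List.count_append, List.count_eq_zero_of_not_mem hnb,
              List.count_eq_zero_of_not_mem hnoqf]
      rw [ih _ (by omega)]
      have hsplit : b ++ ' ' :: (labelFixA c ++ ' ' :: a)
          = (b ++ ' ' :: (labelFixB c ++ [' '])) ++ a := by
        rw [labelFix_eq]; simp
      rw [hsplit, pqlB_prefix a (by
        intro hx
        rcases List.mem_append.1 hx with hx | hx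
        · exact hnb hx
        · rcases List.mem_cons.1 hx with hx | hx
          · exact absurd hx (by decide)
          · rcases List.mem_append.1 hx with hx | hx
            · exact labelFixB_noq hnc hx
            · simp at hx)]
      rw [hdec, hdec2, pqlB_prefix _ hnb, pqlB_pair a hnc]
      simp
    · simp only [h2, if_false]
      interval_cases hcv : s.count '"'
      · exact (pqlB_noq (by intro hm; have := List.count_pos_iff.2 hm; omega)).symm
      · have hm : '"' ∈ s := List.count_pos_iff.1 (by omega)
        rcases partQ_decomp hm with ⟨b, r, hpq, hdec, hnb⟩
        have hnr : '"' ∉ r := by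
          intro hmr
          have h1 := List.count_pos_iff.2 hmr
          have : s.count '"' = b.count '"' + (1 + r.count '"') := by
            subst hdec; simp [List.count_append]; omega
          omega
        rw [hdec]
        exact (pqlB_oneq hnb hnr).symm

theorem pql_eq (s : List Char) : parseQuotedLabelsA s = parseQuotedLabelsB s := by
  exact pql_main s.length s (List.count_le_length)

theorem enum_filter_noq {s : List Char} (h : '"' ∉ s) : ∀ (k : Int),
    (PySem.List.enumerate s k).filter (fun p => p.2 == '"') = [] := by
  induction s with
  | nil => intro k; simp [PySem.List.enumerate_nil]
  | cons c t ih =>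
    intro k
    have hc : ¬ (c = '"') := fun he => h (he ▸ List.mem_cons_self ..)
    have ht : '"' ∉ t := fun hm => h (List.mem_cons_of_mem _ hm)
    rw [PySem.List.enumerate_cons]
    simp only [List.filter_cons]
    have : ((k, c).2 == '"') = false := by simpa using hc
    simp [this, ih ht (k + 1)]

theorem enum_filter_decomp {b : List Char} (r : List Char) (k : Int) (hb : '"' ∉ b) :
    (PySem.List.enumerate (b ++ '"' :: r) k).filter (fun p => p.2 == '"')
      = ((k + b.length, '"') : Int × Char)
          :: (PySem.List.enumerate r (k + b.length + 1)).filter (fun p => p.2 == '"') := by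
  rw [PySem.List.enumerate_append, List.filter_append, enum_filter_noq hb k,
      PySem.List.enumerate_cons]
  simp

theorem pqf_eq (s : List Char) : parseQuotedFilenameA s = parseQuotedFilenameB s := by
  unfold parseQuotedFilenameA parseQuotedFilenameB
  by_cases hm : '"' ∈ s
  · rcases partQ_decomp hm with ⟨b, r, hpq, hdec, hnb⟩
    by_cases hmr : '"' ∈ r
    · rcases partQ_decomp hmr with ⟨c, a, hpq2, hdec2, hnc⟩
      subst hdec2
      have hcnt : 2 ≤ PySem.Chars.count s ['"'] := by
        rw [count_quote_eq, hdec]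
        simp [List.count_append]
        omega
      rw [if_neg (by omega)]
      simp only [hpq, hpq2]
      have hq1 : (PySem.List.enumerate s).filter (fun p => p.2 == '"')
          = ((0 + (b.length : Int), '"') : Int × Char)
              :: ((0 + (b.length : Int) + 1 + (c.length : Int), '"') : Int × Char)
              :: (PySem.List.enumerate a (0 + (b.length : Int) + 1 + (c.length : Int) + 1)).filter
                   (fun p => p.2 == '"') := by
        rw [hdec, enum_filter_decomp _ 0 hnb, enum_filter_decomp _ _ hnc]
      rw [hq1]
      simp only [List.map_cons, zero_add]
      have h1 : PySem.List.slice s none (some (b.length : Int)) = b := by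
        rw [PySem.List.slice_to s (by positivity)]
        rw [hdec]
        simp
      have h2 : PySem.List.slice s (some ((b.length : Int) + 1))
            (some ((b.length : Int) + 1 + (c.length : Int))) = c := by
        rw [PySem.List.slice_toNat s (by positivity) (by positivity)]
        have e1 : ((b.length : Int) + 1).toNat = b.length + 1 := by omega
        have e2 : ((b.length : Int) + 1 + (c.length : Int)).toNat = b.length + 1 + c.length := by
          omega
        rw [e1, e2, hdec]
        rw [show b ++ '"' :: (c ++ '"' :: a) = (b ++ ['"']) ++ (c ++ '"' :: a) by simp]
        rw [show b.length + 1 = (b ++ ['"']).length by simp]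
        rw [List.drop_left]
        have : (b ++ ['"']).length + c.length - (b ++ ['"']).length = c.length := by omega
        rw [this]
        simp
      have h3 : PySem.List.slice s (some ((b.length : Int) + 1 + (c.length : Int) + 1)) none
          = a := by
        rw [PySem.List.slice_from s (by positivity)]
        have e3 : ((b.length : Int) + 1 + (c.length : Int) + 1).toNat
            = (b ++ '"' :: c ++ ['"']).length := by simp; omega
        rw [e3, hdec]
        rw [show b ++ '"' :: (c ++ '"' :: a) = (b ++ '"' :: c ++ ['"']) ++ a by simp]
        rw [List.drop_left]
      rw [h1, h2, h3]
    · have hnr : '"' ∉ r := hmr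
      have hcnt : PySem.Chars.count s ['"'] = 1 := by
        rw [count_quote_eq, hdec]
        simp [List.count_append, List.count_eq_zero_of_not_mem hnb,
              List.count_eq_zero_of_not_mem hnr]
      rw [if_pos (by omega)]
      have hq1 : (PySem.List.enumerate s).filter (fun p => p.2 == '"')
          = [((0 + (b.length : Int), '"') : Int × Char)] := by
        rw [hdec, enum_filter_decomp _ 0 hnb, enum_filter_noq hnr]
      rw [hq1]
      simp
  · have hcnt : PySem.Chars.count s ['"'] = 0 := by
      rw [count_quote_eq]
      exact List.count_eq_zero_of_not_mem hm
    rw [if_pos (by omega)]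
    have hq0 : (PySem.List.enumerate s).filter (fun p => p.2 == '"') = [] :=
      enum_filter_noq hm 0
    rw [hq0]
    simp

theorem foldl_if_filterMap {α β : Type} (l : List α) (p : α → Bool) (g : α → β) :
    ∀ (acc : List β),
    l.foldl (fun acc x => if p x then acc else acc ++ [g x]) acc
      = acc ++ l.filterMap (fun x => if p x then none else some (g x)) := by
  induction l with
  | nil => intro acc; simp
  | cons x t ih =>
    intro acc
    simp only [List.foldl_cons, List.filterMap_cons]
    by_cases hp : p x
    · simp [hp, ih acc]
    · simp [hp, ih (acc ++ [g x])]

theorem last_eq (l : List String) :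
    PySem.List.pyGet? (PySem.List.slice l (some (-1)) none) 0 = l.getLast? := by
  have hdrop : ∀ (l : List String), l.drop (l.length - 1) = l.getLast?.toList := by
    intro l
    induction l with
    | nil => simp
    | cons x t ih =>
      cases t with
      | nil => simp
      | cons y u =>
        rw [show (x :: y :: u).length - 1 = (y :: u).length - 1 + 1 by simp]
        rw [List.drop_succ_cons]
        rw [ih]
        simp
  rw [PySem.List.slice_from_neg_one, hdrop]
  cases hl : l.getLast? with
  | none => simp [PySem.List.pyGet?]
  | some x => simp [PySem.List.pyGet?, PySem.List.pyIdx?]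

theorem mlgA_eq (fl : List String) :
    make_line_gen fl
      = fl.filterMap (fun line =>
          if (PySem.Chars.split₀ (parseQuotedLabelsA (PySem.Chars.upper (rstripSNR line.toList)))).isEmpty
          then none
          else some
            ((PySem.Chars.split₀ (parseQuotedLabelsA (PySem.Chars.upper (rstripSNR line.toList)))).map String.ofList,
             (parseQuotedFilenameA (rstripSNR line.toList)).map String.ofList,
             String.ofList (parseQuotedLabelsA (PySem.Chars.upper (rstripSNR line.toList))),
             some line == PySem.List.pyGet? (PySem.List.slice fl (some (-1)) none) 0))
        ++ [([], [], "", true)] := by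
  unfold make_line_gen
  congr 1
  simpa using foldl_if_filterMap fl
    (fun line => (PySem.Chars.split₀ (parseQuotedLabelsA (PySem.Chars.upper (rstripSNR line.toList)))).isEmpty)
    (fun line =>
      ((PySem.Chars.split₀ (parseQuotedLabelsA (PySem.Chars.upper (rstripSNR line.toList)))).map String.ofList,
       (parseQuotedFilenameA (rstripSNR line.toList)).map String.ofList,
       String.ofList (parseQuotedLabelsA (PySem.Chars.upper (rstripSNR line.toList))),
       some line == PySem.List.pyGet? (PySem.List.slice fl (some (-1)) none) 0))
    []

-- ===== VERDICT (by name: the statement is the Claim_ definition above) =====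
theorem make_line_gen_spec : Claim_equal_make_line_gen := by
  unfold Claim_equal_make_line_gen
  intro file_lines _
  unfold Spec_make_line_gen
  rw [mlgA_eq]
  unfold make_line_gen_alt
  simp only [pql_eq, pqf_eq, last_eq]
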